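-- pv_equiv track=rewrite | github.com/RaviTeja163/Heavy-N-queens-Heuristic-Optimization | DFS_weighted_N_Queens.py | getQueensOnEdges
-- ===== SOURCE A (Python) =====
-- def getQueensOnEdges(board):
--     q_on_edges = 0
--     for i in range(len(board)):
--         for j in range(len(board)):
--             if board[j][i] > 0:
--                 if i == 0 or j == 0 or i == len(board) - 1 or j == len(board) - 1:
--                     q_on_edges += 1
--     return q_on_edges
-- ===== SOURCE B (Python) =====
-- def getQueensOnEdges(board):
--     # Edge-slice decomposition: top row, bottom row, then the two side
--     # columns over interior rows only (corners counted once).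
--     n = len(board)
--     if n == 0:
--         return 0
--     total = sum(1 for x in board[0][:n] if x > 0)
--     if n > 1:
--         total += sum(1 for x in board[n - 1][:n] if x > 0)
--         for row in board[1:n - 1]:
--             total += (1 if row[0] > 0 else 0) + (1 if row[n - 1] > 0 else 0)
--     return total
-- ===== Notes on version B (the rewrite author's own statement) =====
-- stated objective: alternative
-- what changed: Replaces the O(n^2) nested scan with a border predicate by four linear edge passes: count positives in the top and bottom row slices and, over interior rows only, in the two side columns, so corners are counted once by construction.
import Mathlib
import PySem

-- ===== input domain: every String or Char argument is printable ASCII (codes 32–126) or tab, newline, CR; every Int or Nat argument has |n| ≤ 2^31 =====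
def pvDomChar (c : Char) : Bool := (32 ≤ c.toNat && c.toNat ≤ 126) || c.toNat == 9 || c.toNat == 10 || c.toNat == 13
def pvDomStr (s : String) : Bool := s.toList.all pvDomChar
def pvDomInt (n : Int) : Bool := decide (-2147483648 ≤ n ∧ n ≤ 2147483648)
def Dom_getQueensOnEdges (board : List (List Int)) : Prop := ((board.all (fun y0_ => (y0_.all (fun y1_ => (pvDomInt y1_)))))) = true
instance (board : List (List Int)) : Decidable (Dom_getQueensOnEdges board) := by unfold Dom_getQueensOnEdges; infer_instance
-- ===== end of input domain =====

-- B: four edge passes (O(n)) instead of A's full nested scan (O(n^2)); return values proved equal under Pre_.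

-- ===== PORT A =====
def getQueensOnEdges (board : List (List Int)) : Int :=
  (PySem.List.pyRange 0 (board.length : Int) 1).foldl (fun acc i =>
    (PySem.List.pyRange 0 (board.length : Int) 1).foldl (fun acc j =>
      if 0 < PySem.List.pyGetD (PySem.List.pyGetD board j []) i 0 then
        if i = 0 ∨ j = 0 ∨ i = (board.length : Int) - 1 ∨ j = (board.length : Int) - 1 then
          acc + 1
        else acc
      else acc) acc) 0

-- ===== PORT B =====
def getQueensOnEdges_alt (board : List (List Int)) : Int :=
  let n : Int := (board.length : Int)
  if n = 0 then 0
  else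
    let total : Int :=
      ((PySem.List.slice (PySem.List.pyGetD board 0 []) none (some n)).countP (fun x => 0 < x) : Nat)
    if 1 < n then
      let total := total +
        ((PySem.List.slice (PySem.List.pyGetD board (n - 1) []) none (some n)).countP (fun x => 0 < x) : Nat)
      (PySem.List.slice board (some 1) (some (n - 1))).foldl (fun acc row =>
        acc + (if 0 < PySem.List.pyGetD row 0 0 then 1 else 0)
            + (if 0 < PySem.List.pyGetD row (n - 1) 0 then 1 else 0)) total
    else total

-- ===== PRECONDITION & SPEC =====
-- Pre_: exactly the inputs where A returns — every row must be at least n = len(board) long,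
-- otherwise A's board[j][i] raises IndexError.
def Pre_getQueensOnEdges (board : List (List Int)) : Prop :=
  ∀ row ∈ board, board.length ≤ row.length
instance (board : List (List Int)) : Decidable (Pre_getQueensOnEdges board) := by
  unfold Pre_getQueensOnEdges; infer_instance

def pvWitness_getQueensOnEdges : List (List Int) := [[1, -2, 0], [0, 3, 1], [2, 0, -1]]

def Spec_getQueensOnEdges (board : List (List Int)) (out : Int) : Prop := out = getQueensOnEdges_alt board
instance (board : List (List Int)) (out : Int) : Decidable (Spec_getQueensOnEdges board out) := by
  unfold Spec_getQueensOnEdges; infer_instance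

-- ===== CLAIM (what is proved, stated in full; the proofs are below) =====
def Claim_equal_getQueensOnEdges : Prop := ∀ (board : List (List Int)), Dom_getQueensOnEdges board → Pre_getQueensOnEdges board → Spec_getQueensOnEdges board (getQueensOnEdges board)

-- ===== LEMMAS AND PROOFS =====

def pvIdx (board : List (List Int)) (i j : Nat) : Int :=
  if 0 < (board.getD j []).getD i 0 ∧
      (i = 0 ∨ j = 0 ∨ i + 1 = board.length ∨ j + 1 = board.length) then 1 else 0

theorem pv_foldl_add_range (g : Nat → Int) (n : Nat) (a : Int) :
    List.foldl (fun acc i => acc + g i) a (List.range n)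
      = a + ∑ i ∈ Finset.range n, g i := by
  induction n generalizing a with
  | zero => simp
  | succ n ih =>
      rw [List.range_succ, List.foldl_append]
      simp only [List.foldl_cons, List.foldl_nil]
      rw [ih, Finset.sum_range_succ]
      ring

theorem pv_foldl_ite2_range (A B : Nat → Prop) [DecidablePred A] [DecidablePred B] (n : Nat) (a : Int) :
    List.foldl (fun acc j => if A j then if B j then acc + 1 else acc else acc) a (List.range n)
      = a + ∑ j ∈ Finset.range n, (if A j ∧ B j then (1:Int) else 0) := by
  induction n generalizing a with
  | zero => simp
  | succ n ih =>
      rw [List.range_succ, List.foldl_append]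
      simp only [List.foldl_cons, List.foldl_nil]
      rw [ih, Finset.sum_range_succ]
      by_cases hA : A n
      · by_cases hB : B n
        · rw [if_pos hA, if_pos hB, if_pos ⟨hA, hB⟩]; ring
        · rw [if_pos hA, if_neg hB, if_neg (fun h => hB h.2), add_zero]
      · rw [if_neg hA, if_neg (fun h => hA h.1), add_zero]

theorem pv_A_sum (board : List (List Int)) :
    getQueensOnEdges board
      = ∑ i ∈ Finset.range board.length, ∑ j ∈ Finset.range board.length, pvIdx board i j := by
  unfold getQueensOnEdges
  rw [PySem.List.pyRange_one]
  simp only [zero_add, sub_zero, Int.toNat_natCast, List.foldl_map, PySem.List.pyGetD_natCast]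
  have hinner : ∀ (i : Nat) (acc : Int),
      List.foldl (fun x j =>
        if 0 < (board.getD j []).getD i 0 then
          if (↑i:Int) = 0 ∨ (↑j:Int) = 0 ∨ (↑i:Int) = ↑board.length - 1 ∨ (↑j:Int) = ↑board.length - 1 then x + 1 else x
        else x) acc (List.range board.length)
      = acc + ∑ j ∈ Finset.range board.length, pvIdx board i j := by
    intro i acc
    rw [pv_foldl_ite2_range (fun j => 0 < (board.getD j []).getD i 0)
        (fun j => (↑i:Int) = 0 ∨ (↑j:Int) = 0 ∨ (↑i:Int) = ↑board.length - 1 ∨ (↑j:Int) = ↑board.length - 1)]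
    congr 1
    apply Finset.sum_congr rfl
    intro j _
    unfold pvIdx
    have hc : (0 < (board.getD j []).getD i 0 ∧
        ((↑i:Int) = 0 ∨ (↑j:Int) = 0 ∨ (↑i:Int) = ↑board.length - 1 ∨ (↑j:Int) = ↑board.length - 1))
        ↔ (0 < (board.getD j []).getD i 0 ∧
            (i = 0 ∨ j = 0 ∨ i + 1 = board.length ∨ j + 1 = board.length)) := by
      constructor <;> rintro ⟨h, hd⟩ <;> exact ⟨h, by omega⟩
    rw [if_congr hc rfl rfl]
  have houter : (fun (x : Int) (y : Nat) =>
      List.foldl (fun x j =>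
        if 0 < (board.getD j []).getD y 0 then
          if (↑y:Int) = 0 ∨ (↑j:Int) = 0 ∨ (↑y:Int) = ↑board.length - 1 ∨ (↑j:Int) = ↑board.length - 1 then x + 1 else x
        else x) x (List.range board.length))
      = fun x y => x + ∑ j ∈ Finset.range board.length, pvIdx board y j :=
    funext fun acc => funext fun i => hinner i acc
  rw [houter, pv_foldl_add_range, zero_add]


theorem pv_sum_indicator_take (row : List Int) (n : Nat) (h : n ≤ row.length) :
    ∑ i ∈ Finset.range n, (if 0 < row.getD i 0 then (1:Int) else 0)
      = (((row.take n).countP (fun x => decide (0 < x)) : Nat) : Int) := by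
  induction n with
  | zero => simp
  | succ n ih =>
      have hb : n < row.length := by omega
      have hg : row.getD n 0 = row[n] := by
        simp [List.getD_eq_getElem?_getD, List.getElem?_eq_getElem hb]
      rw [Finset.sum_range_succ, ih (by omega), List.take_add_one,
          List.getElem?_eq_getElem hb, List.countP_append, hg]
      push_cast
      simp only [Option.toList_some, List.countP_cons, List.countP_nil]
      simp only [decide_eq_true_eq]
      split_ifs <;> push_cast <;> ring

theorem pv_sum_take_map {α : Type} (xs : List α) (d : α) (g : α → Int) (a m : Nat)
    (h : a + m ≤ xs.length) :
    (((xs.drop a).take m).map g).sum = ∑ j ∈ Finset.Ico a (a + m), g (xs.getD j d) := by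
  induction m with
  | zero => simp
  | succ m ih =>
      have hb : a + m < xs.length := by omega
      have hsome : (xs.drop a)[m]? = some (xs.getD (a + m) d) := by
        rw [List.getElem?_drop]
        simp [List.getElem?_eq_getElem hb, List.getD_eq_getElem?_getD]
      rw [List.take_add_one, hsome]
      rw [show a + (m + 1) = (a + m) + 1 from rfl,
          Finset.sum_Ico_succ_top (by omega : a ≤ a + m), ← ih (by omega)]
      simp

theorem pv_row_edge (board : List (List Int)) (j : Nat)
    (hj : j = 0 ∨ j + 1 = board.length)
    (hlen : board.length ≤ (board.getD j []).length) :
    ∑ i ∈ Finset.range board.length, pvIdx board i j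
      = ((((board.getD j []).take board.length).countP (fun x => decide (0 < x)) : Nat) : Int) := by
  have hpt : ∀ i ∈ Finset.range board.length,
      pvIdx board i j = if 0 < (board.getD j []).getD i 0 then (1:Int) else 0 := by
    intro i _
    unfold pvIdx
    split_ifs <;> tauto
  rw [Finset.sum_congr rfl hpt, pv_sum_indicator_take _ _ hlen]

theorem pv_row_mid (board : List (List Int)) (j : Nat)
    (hj0 : 1 ≤ j) (hjn : j + 2 ≤ board.length) :
    ∑ i ∈ Finset.range board.length, pvIdx board i j
      = (if 0 < (board.getD j []).getD 0 0 then (1:Int) else 0)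
        + (if 0 < (board.getD j []).getD (board.length - 1) 0 then (1:Int) else 0) := by
  have hpt : ∀ i ∈ Finset.range board.length,
      pvIdx board i j
        = (if i = 0 then (if 0 < (board.getD j []).getD 0 0 then (1:Int) else 0) else 0)
          + (if i = board.length - 1 then (if 0 < (board.getD j []).getD (board.length - 1) 0 then (1:Int) else 0) else 0) := by
    intro i hi
    have hi' : i < board.length := Finset.mem_range.mp hi
    unfold pvIdx
    by_cases h0 : i = 0
    · subst h0
      have hne : (0:Nat) ≠ board.length - 1 := by omega
      have hiff : (0 < (board.getD j []).getD 0 0 ∧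
          ((0:Nat) = 0 ∨ j = 0 ∨ 0 + 1 = board.length ∨ j + 1 = board.length))
            ↔ 0 < (board.getD j []).getD 0 0 :=
        ⟨And.left, fun h => ⟨h, Or.inl rfl⟩⟩
      rw [if_congr hiff rfl rfl]
      simp [if_neg hne]
    · by_cases h1 : i = board.length - 1
      · subst h1
        have hne : board.length - 1 ≠ 0 := by omega
        have hiff : (0 < (board.getD j []).getD (board.length - 1) 0 ∧
            (board.length - 1 = 0 ∨ j = 0 ∨ board.length - 1 + 1 = board.length ∨ j + 1 = board.length))
              ↔ 0 < (board.getD j []).getD (board.length - 1) 0 :=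
          ⟨And.left, fun h => ⟨h, Or.inr (Or.inr (Or.inl (by omega)))⟩⟩
        rw [if_congr hiff rfl rfl]
        simp [if_neg hne]
      · have hfalse : ¬(0 < (board.getD j []).getD i 0 ∧
            (i = 0 ∨ j = 0 ∨ i + 1 = board.length ∨ j + 1 = board.length)) := by
          rintro ⟨-, hc⟩
          rcases hc with h | h | h | h <;> omega
        simp only [if_neg hfalse, if_neg h0, if_neg h1, add_zero]
  rw [Finset.sum_congr rfl hpt, Finset.sum_add_distrib]
  rw [Finset.sum_ite_eq' (Finset.range board.length) 0 (fun _ => if 0 < (board.getD j []).getD 0 0 then (1:Int) else 0),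
      Finset.sum_ite_eq' (Finset.range board.length) (board.length - 1) (fun _ => if 0 < (board.getD j []).getD (board.length - 1) 0 then (1:Int) else 0)]
  have h0m : (0:Nat) ∈ Finset.range board.length := by simp; omega
  have h1m : board.length - 1 ∈ Finset.range board.length := by simp; omega
  rw [if_pos h0m, if_pos h1m]

-- ===== VERDICT (by name: the statement is the Claim_ definition above) =====
theorem pv_getD_mem (board : List (List Int)) (j : Nat) (hj : j < board.length) :
    board.getD j [] ∈ board := by
  rw [List.getD_eq_getElem board [] hj]
  exact List.getElem_mem hj

theorem pv_main (board : List (List Int)) (hpre : Pre_getQueensOnEdges board) :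
    getQueensOnEdges board = getQueensOnEdges_alt board := by
  by_cases h0 : board.length = 0
  · rw [pv_A_sum]
    simp [getQueensOnEdges_alt, h0]
  · by_cases h1 : board.length = 1
    · have hlen0 : board.length ≤ (board.getD 0 []).length :=
        hpre _ (pv_getD_mem board 0 (by omega))
      have e1 : getQueensOnEdges_alt board
          = ((((board.getD 0 []).take 1).countP (fun x => decide (0 < x)) : Nat) : Int) := by
        unfold getQueensOnEdges_alt
        rw [PySem.List.pyGetD_zero]
        simp [h1]
        rw [PySem.List.slice_to] <;> norm_num
      rw [pv_A_sum, e1, ← pv_sum_indicator_take _ 1 (by omega), h1]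
      simp only [Finset.sum_range_one]
      unfold pvIdx
      have hiff : (0 < (board.getD 0 []).getD 0 0 ∧
          ((0:Nat) = 0 ∨ (0:Nat) = 0 ∨ 0 + 1 = board.length ∨ 0 + 1 = board.length))
            ↔ 0 < (board.getD 0 []).getD 0 0 :=
        ⟨And.left, fun h => ⟨h, Or.inl rfl⟩⟩
      rw [if_congr hiff rfl rfl]
    · have h2 : 2 ≤ board.length := by omega
      have hc : ((board.length : Int) - 1) = ((board.length - 1 : Nat) : Int) := by omega
      have eB : getQueensOnEdges_alt board
          = ((((board.getD 0 []).take board.length).countP (fun x => decide (0 < x)) : Nat) : Int)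
            + ((((board.getD (board.length - 1) []).take board.length).countP (fun x => decide (0 < x)) : Nat) : Int)
            + (((board.drop 1).take (board.length - 1 - 1)).map (fun row =>
                (if 0 < row.getD 0 0 then (1:Int) else 0)
                  + (if 0 < row.getD (board.length - 1) 0 then (1:Int) else 0))).sum := by
        unfold getQueensOnEdges_alt
        rw [if_neg (by omega : ¬((board.length : Int) = 0)),
            if_pos (by omega : (1:Int) < (board.length : Int))]
        rw [hc, PySem.List.pyGetD_zero, PySem.List.pyGetD_natCast]
        simp only [PySem.List.slice_to_natCast, PySem.List.pyGetD_zero,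
          PySem.List.pyGetD_natCast]
        rw [PySem.List.slice_toNat] <;> try omega
        simp only [Int.toNat_one, Int.toNat_natCast]
        have hb2 : (fun (acc : Int) (row : List Int) =>
            (acc + if 0 < row.getD 0 0 then (1:Int) else 0)
              + if 0 < row.getD (board.length - 1) 0 then (1:Int) else 0)
            = fun acc row => acc +
                ((if 0 < row.getD 0 0 then (1:Int) else 0)
                  + (if 0 < row.getD (board.length - 1) 0 then (1:Int) else 0)) := by
          funext a r
          ring
        rw [hb2, PySem.List.foldl_add]
      have hl0 : board.length ≤ (board.getD 0 []).length :=
        hpre _ (pv_getD_mem board 0 (by omega))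
      have hlL : board.length ≤ (board.getD (board.length - 1) []).length :=
        hpre _ (pv_getD_mem board (board.length - 1) (by omega))
      rw [pv_A_sum, Finset.sum_comm, eB]
      rw [Finset.range_eq_Ico,
          ← Finset.sum_Ico_consecutive _ (by omega : (0:Nat) ≤ 1) (by omega : 1 ≤ board.length),
          ← Finset.sum_Ico_consecutive _ (by omega : (1:Nat) ≤ board.length - 1)
            (by omega : board.length - 1 ≤ board.length)]
      simp only [← Finset.range_eq_Ico]
      have s1 : (∑ j ∈ Finset.range 1, ∑ i ∈ Finset.range board.length, pvIdx board i j)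
          = ∑ i ∈ Finset.range board.length, pvIdx board i 0 := by
        simp
      have s2 : (∑ j ∈ Finset.Ico (board.length - 1) board.length,
            ∑ i ∈ Finset.range board.length, pvIdx board i j)
          = ∑ i ∈ Finset.range board.length, pvIdx board i (board.length - 1) := by
        rw [Finset.sum_Ico_eq_sum_range]
        have hone : board.length - (board.length - 1) = 1 := by omega
        rw [hone]
        simp
      have smid : (∑ j ∈ Finset.Ico 1 (board.length - 1),
            ∑ i ∈ Finset.range board.length, pvIdx board i j)
          = (((board.drop 1).take (board.length - 1 - 1)).map (fun row =>
              (if 0 < row.getD 0 0 then (1:Int) else 0)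
                + (if 0 < row.getD (board.length - 1) 0 then (1:Int) else 0))).sum := by
        have hmap := pv_sum_take_map board [] (fun row =>
            (if 0 < row.getD 0 0 then (1:Int) else 0)
              + (if 0 < row.getD (board.length - 1) 0 then (1:Int) else 0)) 1
            (board.length - 2) (by omega)
        have htk : board.length - 1 - 1 = board.length - 2 := by omega
        have hup : 1 + (board.length - 2) = board.length - 1 := by omega
        rw [htk, hmap, hup]
        exact Finset.sum_congr rfl fun j hj => by
          have hj' := Finset.mem_Ico.mp hj
          exact pv_row_mid board j (by omega) (by omega)
      rw [s1, s2, smid, pv_row_edge board 0 (Or.inl rfl) hl0,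
          pv_row_edge board (board.length - 1) (Or.inr (by omega)) hlL]
      ring

-- ===== VERDICT (by name: the statement is the Claim_ definition above) =====
theorem getQueensOnEdges_spec : Claim_equal_getQueensOnEdges := by
  intro board _ hpre
  exact pv_main board hpre
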